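-- pv_equiv track=rewrite | github.com/hye0ngyun/PythonPractice | Playground/programmers_daily.py | solution
-- ===== SOURCE A (Python) =====
-- def solution(price, money, count):
--     answer = -1
--     result = 0
--     for N in range(1, count + 1):
--         result += N * price
--     money -= result
--
--     if money < 0:
--         answer = abs(money)
--     else:
--         answer = money
--
--     return answer
-- ===== SOURCE B (Python) =====
-- def solution(price, money, count):
--     total = price * count * (count + 1) // 2 if count > 0 else 0
--     return abs(money - total)
-- ===== Notes on version B (the rewrite author's own statement) =====
-- stated objective: faster
-- what changed: Replaces the O(count) summation loop with the closed-form triangular-number formula price*count*(count+1)//2 and folds the two return branches into a single abs().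
import Mathlib
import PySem

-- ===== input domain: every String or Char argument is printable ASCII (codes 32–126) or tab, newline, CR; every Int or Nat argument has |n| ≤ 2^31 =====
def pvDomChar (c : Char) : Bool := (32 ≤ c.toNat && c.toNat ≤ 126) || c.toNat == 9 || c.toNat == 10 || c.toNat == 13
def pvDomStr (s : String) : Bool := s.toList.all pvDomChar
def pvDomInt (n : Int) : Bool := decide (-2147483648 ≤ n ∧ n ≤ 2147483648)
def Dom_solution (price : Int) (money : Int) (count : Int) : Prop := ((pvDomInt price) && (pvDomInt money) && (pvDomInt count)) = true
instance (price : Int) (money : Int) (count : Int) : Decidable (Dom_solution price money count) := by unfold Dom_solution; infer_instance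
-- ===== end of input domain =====

-- B replaces A's O(count) summation loop with the closed-form formula price*count*(count+1)//2 (objective: faster).

-- ===== PORT A =====
def solution (price : Int) (money : Int) (count : Int) : Int :=
  let result := (PySem.List.pyRange 1 (count + 1) 1).foldl (fun r N => r + N * price) 0
  let money := money - result
  if money < 0 then |money| else money

-- ===== PORT B =====
def solution_alt (price : Int) (money : Int) (count : Int) : Int :=
  let total := if count > 0 then PySem.Int.floordiv (price * count * (count + 1)) 2 else 0
  |money - total|

-- ===== PRECONDITION & SPEC =====
def Spec_solution (price : Int) (money : Int) (count : Int) (out : Int) : Prop := out = solution_alt price money count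
instance (price : Int) (money : Int) (count : Int) (out : Int) : Decidable (Spec_solution price money count out) := by unfold Spec_solution; infer_instance

-- ===== CLAIM (what is proved, stated in full; the proofs are below) =====
def Claim_equal_solution : Prop := ∀ (price : Int) (money : Int) (count : Int), Dom_solution price money count → Spec_solution price money count (solution price money count)

-- ===== LEMMAS AND PROOFS =====

-- A's loop sums price·N for N = 1..n; its double equals price·n·(n+1).
lemma loop_sum_double (price : Int) : ∀ n : Nat,
    2 * (PySem.List.pyRange 1 ((n : Int) + 1) 1).foldl (fun r N => r + N * price) 0
      = price * n * ((n : Int) + 1) := by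
  intro n
  induction n with
  | zero => simp [PySem.List.pyRange_one_eq_nil]
  | succ k ih =>
    have h : PySem.List.pyRange 1 ((k : Int) + 1 + 1) 1
        = PySem.List.pyRange 1 ((k : Int) + 1) 1 ++ [(k : Int) + 1] :=
      PySem.List.pyRange_one_succ_right (by omega)
    push_cast
    push_cast at ih
    rw [show ((k : Int) + 1 + 1) = (((k : Int) + 1) + 1) by ring, h, List.foldl_append]
    simp only [List.foldl]
    ring_nf
    ring_nf at ih
    omega

lemma loop_sum (price count : Int) (h : 0 < count) :
    (PySem.List.pyRange 1 (count + 1) 1).foldl (fun r N => r + N * price) 0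
      = PySem.Int.floordiv (price * count * (count + 1)) 2 := by
  obtain ⟨n, rfl⟩ : ∃ n : Nat, count = (n : Int) := ⟨count.toNat, (Int.toNat_of_nonneg h.le).symm⟩
  have hd := loop_sum_double price n
  set s := (PySem.List.pyRange 1 ((n : Int) + 1) 1).foldl (fun r N => r + N * price) 0 with hs
  have : price * (n : Int) * ((n : Int) + 1) = 2 * s := hd.symm
  rw [this]
  simp [PySem.Int.floordiv]

-- ===== VERDICT (by name: the statement is the Claim_ definition above) =====
theorem solution_spec : Claim_equal_solution := by
  intro price money count _
  unfold Spec_solution solution solution_alt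
  by_cases hc : 0 < count
  · rw [if_pos hc, loop_sum price count hc]
    set m := money - PySem.Int.floordiv (price * count * (count + 1)) 2
    by_cases hm : m < 0
    · rw [if_pos hm, abs_of_neg hm]
    · rw [if_neg hm, abs_of_nonneg (not_lt.mp hm)]
  · rw [if_neg hc, PySem.List.pyRange_one_eq_nil (by omega)]
    simp only [List.foldl_nil, sub_zero]
    by_cases hm : money < 0
    · rw [if_pos hm, abs_of_neg hm]
    · rw [if_neg hm, abs_of_nonneg (not_lt.mp hm)]
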